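-- pv_equiv track=rewrite | github.com/puun555/PrePro65 | 76-2 Peterpanflames.py | outside
-- ===== SOURCE A (Python) =====
-- def outside(i, long):
--     """Hello My Code"""
--     line = ""
--     for j in range(1, long+1):
--         j += 1
--         # line+=str(j)
--         if j%12 == 0:
--             line += '◊'
--         elif j%4 == 0 and j%12 != 0:
--             line += '♦'
--         else:
--             line += '.'
--     if i == 1:
--         line += '\n'
--     return line
-- ===== SOURCE B (Python) =====
-- def outside(i, long):
--     period = "".join('◊' if j % 12 == 0 else ('♦' if j % 4 == 0 else '.') for j in range(2, 14))
--     body = "" if long <= 0 else (period * (long // 12 + 1))[:long]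
--     return body + ("\n" if i == 1 else "")
-- ===== Notes on version B (the rewrite author's own statement) =====
-- stated objective: faster
-- what changed: B exploits that the character at each position depends only on the position mod 12: it builds the 12-character period once and tiles-and-truncates it (string multiply + slice) to the requested length, instead of re-testing %12/%4 and concatenating at every position.
import Mathlib
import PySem

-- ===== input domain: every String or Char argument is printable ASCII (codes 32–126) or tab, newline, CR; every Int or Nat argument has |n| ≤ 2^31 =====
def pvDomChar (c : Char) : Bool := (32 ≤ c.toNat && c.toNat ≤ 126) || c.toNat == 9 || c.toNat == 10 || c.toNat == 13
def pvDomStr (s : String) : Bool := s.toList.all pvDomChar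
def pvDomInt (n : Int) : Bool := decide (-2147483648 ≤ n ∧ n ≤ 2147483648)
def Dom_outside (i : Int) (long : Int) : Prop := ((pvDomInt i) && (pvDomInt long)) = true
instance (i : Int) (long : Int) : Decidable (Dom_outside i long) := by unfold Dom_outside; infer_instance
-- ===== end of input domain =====

-- B builds the 12-character period once and tiles it to the requested length, instead of testing %12/%4 at every position: simpler.

-- ===== PORT A =====
-- strings are handled as their char lists (String.mk at the end); each '+=' appends one char
def outside (i : Int) (long : Int) : String :=
  let line : List Char :=
    (PySem.List.pyRange 1 (long + 1) 1).foldl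
      (fun line j =>
        let j := j + 1
        if PySem.Int.mod j 12 = 0 then line ++ ['◊']
        else if PySem.Int.mod j 4 = 0 ∧ PySem.Int.mod j 12 ≠ 0 then line ++ ['♦']
        else line ++ ['.'])
      []
  let line := if i = 1 then line ++ ['\n'] else line
  String.mk line

-- ===== PORT B =====
def outside_alt (i : Int) (long : Int) : String :=
  let period : List Char :=
    (PySem.List.pyRange 2 14 1).map
      (fun j => if PySem.Int.mod j 12 = 0 then '◊'
                else if PySem.Int.mod j 4 = 0 then '♦' else '.')
  let body : List Char :=
    if long ≤ 0 then []
    else PySem.List.slice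
      (List.flatten (List.replicate (PySem.Int.floordiv long 12 + 1).toNat period))
      none (some long)
  String.mk (body ++ (if i = 1 then ['\n'] else []))

-- ===== PRECONDITION & SPEC =====
def Spec_outside (i : Int) (long : Int) (out : String) : Prop := out = outside_alt i long
instance (i : Int) (long : Int) (out : String) : Decidable (Spec_outside i long out) := by unfold Spec_outside; infer_instance

-- ===== CLAIM (what is proved, stated in full; the proofs are below) =====
def Claim_equal_outside : Prop := ∀ (i : Int) (long : Int), Dom_outside i long → Spec_outside i long (outside i long)

-- ===== LEMMAS AND PROOFS =====

-- A's per-position character, as a function of the (already incremented) index j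
def pvCharA (j : Int) : Char :=
  if PySem.Int.mod j 12 = 0 then '◊'
  else if PySem.Int.mod j 4 = 0 ∧ PySem.Int.mod j 12 ≠ 0 then '♦' else '.'

-- B's per-position character
def pvCharB (j : Int) : Char :=
  if PySem.Int.mod j 12 = 0 then '◊'
  else if PySem.Int.mod j 4 = 0 then '♦' else '.'

theorem pvCharA_eq_B (j : Int) : pvCharA j = pvCharB j := by
  unfold pvCharA pvCharB
  split_ifs with h1 h2 h3 <;> simp_all

-- A's loop body is List.range n mapped through pvCharB (· + 2)
theorem outsideA_body (n : Nat) :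
    (PySem.List.pyRange 1 ((n : Int) + 1) 1).foldl
      (fun line j =>
        let j := j + 1
        if PySem.Int.mod j 12 = 0 then line ++ ['◊']
        else if PySem.Int.mod j 4 = 0 ∧ PySem.Int.mod j 12 ≠ 0 then line ++ ['♦']
        else line ++ ['.'])
      [] = (List.range n).map (fun k : Nat => pvCharB ((k : Int) + 2)) := by
  have hfun : (fun (line : List Char) (j : Int) =>
        let j := j + 1
        if PySem.Int.mod j 12 = 0 then line ++ ['◊']
        else if PySem.Int.mod j 4 = 0 ∧ PySem.Int.mod j 12 ≠ 0 then line ++ ['♦']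
        else line ++ ['.'])
      = fun line j => line ++ [pvCharA (j + 1)] := by
    funext line j
    simp only [pvCharA]
    split_ifs <;> rfl
  rw [hfun, PySem.List.pyRange_one]
  have hN : (((n : Int) + 1) - 1).toNat = n := by omega
  rw [hN, List.foldl_map, PySem.List.foldl_append_singleton_eq_map, List.nil_append]
  apply List.map_congr_left
  intro k _
  rw [show (1 : Int) + (k : Int) + 1 = (k : Int) + 2 by ring, pvCharA_eq_B]

-- indexing a tiled list
theorem getElem?_flatten_replicate {α : Type} (p : List α) (r k : Nat)
    (hk : k < r * p.length) :
    (List.flatten (List.replicate r p))[k]? = p[k % p.length]? := by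
  induction r generalizing k with
  | zero => rw [Nat.zero_mul] at hk; omega
  | succ r ih =>
    have hp : 0 < p.length := by
      rcases Nat.eq_zero_or_pos p.length with h0 | h0
      · rw [h0, Nat.mul_zero] at hk; omega
      · exact h0
    rw [Nat.succ_mul] at hk
    rw [List.replicate_succ, List.flatten_cons]
    by_cases h : k < p.length
    · rw [List.getElem?_append_left h, Nat.mod_eq_of_lt h]
    · rw [List.getElem?_append_right (by omega), ih (k - p.length) (by omega)]
      congr 1
      conv_rhs => rw [show k = p.length + (k - p.length) from by omega]
      rw [Nat.add_mod_left]

theorem pvCharB_periodic (k : Nat) :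
    pvCharB ((k : Int) + 2) = pvCharB (((k % 12 : Nat) : Int) + 2) := by
  unfold pvCharB
  have h12 : PySem.Int.mod ((k : Int) + 2) 12 = PySem.Int.mod (((k % 12 : Nat) : Int) + 2) 12 := by
    rw [PySem.Int.mod_eq_emod_of_pos (by norm_num), PySem.Int.mod_eq_emod_of_pos (by norm_num)]
    omega
  have h4 : PySem.Int.mod ((k : Int) + 2) 4 = PySem.Int.mod (((k % 12 : Nat) : Int) + 2) 4 := by
    rw [PySem.Int.mod_eq_emod_of_pos (by norm_num), PySem.Int.mod_eq_emod_of_pos (by norm_num)]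
    omega
  rw [h12, h4]

-- the period list B builds
theorem period_eq :
    ((PySem.List.pyRange 2 14 1).map
      (fun j => if PySem.Int.mod j 12 = 0 then '◊'
                else if PySem.Int.mod j 4 = 0 then '♦' else '.'))
    = (List.range 12).map (fun m : Nat => pvCharB ((m : Int) + 2)) := by
  decide

theorem bodyB_eq (n : Nat) (hn : 0 < n) :
    PySem.List.slice
      (List.flatten (List.replicate (PySem.Int.floordiv (n : Int) 12 + 1).toNat
        ((List.range 12).map (fun m : Nat => pvCharB ((m : Int) + 2)))))
      none (some (n : Int))
    = (List.range n).map (fun k : Nat => pvCharB ((k : Int) + 2)) := by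
  set p := (List.range 12).map (fun m : Nat => pvCharB ((m : Int) + 2)) with hp
  have hplen : p.length = 12 := by simp [hp]
  have hr : (PySem.Int.floordiv (n : Int) 12 + 1).toNat = n / 12 + 1 := by
    rw [PySem.Int.floordiv_eq_ediv_of_pos (by norm_num)]
    omega
  rw [PySem.List.slice_to _ (by positivity), hr, Int.toNat_natCast]
  apply List.ext_getElem?
  intro k
  rw [List.getElem?_take]
  by_cases hk : k < n
  · rw [if_pos hk,
      getElem?_flatten_replicate p _ k (by rw [hplen]; omega), hplen]
    have hk12 : k % 12 < 12 := Nat.mod_lt _ (by norm_num)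
    rw [hp, List.getElem?_map, List.getElem?_map,
      List.getElem?_range hk12, List.getElem?_range hk]
    simp only [Option.map_some]
    rw [← pvCharB_periodic]
  · rw [if_neg hk, List.getElem?_eq_none]
    simp
    omega

-- ===== VERDICT (by name: the statement is the Claim_ definition above) =====
theorem outside_spec : Claim_equal_outside := by
  intro i long _
  unfold Spec_outside outside outside_alt
  simp only []
  rw [period_eq]
  by_cases hl : long ≤ 0
  · rw [if_pos hl, PySem.List.pyRange_one_eq_nil (by omega)]
    simp only [List.foldl_nil]
    split_ifs <;> rfl
  · obtain ⟨n, rfl⟩ : ∃ n : Nat, long = (n : Int) := ⟨long.toNat, by omega⟩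
    have hn : 0 < n := by omega
    rw [if_neg hl, outsideA_body, bodyB_eq n hn]
    split_ifs <;> simp
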